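-- pv_equiv track=rewrite | github.com/KimHyungkeun/AlgoPractice | Programmers/제로베이스_문제추천_py/레벨1/대충만든자판.py | solution
-- ===== SOURCE A (Python) =====
-- def solution(keymap, targets):
--     answer = []
--     key_dict = {}
--     for i in range(len(keymap)) :
--         for j in range(len(keymap[i])) :
--             if keymap[i][j] not in key_dict :
--                 key_dict[keymap[i][j]] = [(i,j)]
--             else :
--                 key_dict[keymap[i][j]].append((i,j))
--
--     for word in key_dict.keys() :
--         key_dict[word].sort(key = lambda x : x[1])
--
--     for i in range(len(targets)) :
--         total = 0
--         for j in range(len(targets[i])) :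
--             if targets[i][j] not in key_dict :
--                 total = -1
--                 break
--             else :
--                 total += (key_dict[targets[i][j]][0][1] + 1)
--
--         answer.append(total)
--
--     return answer
-- ===== SOURCE B (Python) =====
-- def solution(keymap, targets):
--     answer = []
--     for word in targets:
--         total = 0
--         for ch in word:
--             best = -1
--             for row in keymap:
--                 for j in range(len(row)):
--                     if row[j] == ch and (best == -1 or j < best):
--                         best = j
--             if best == -1:
--                 total = -1
--                 break
--             total += best + 1
--         answer.append(total)
--     return answer
-- ===== Notes on version B (the rewrite author's own statement) =====
-- stated objective: alternative
-- what changed: Drops A's char->positions dictionary and per-key sorting entirely: B scans the whole keymap per target character to find the minimum column directly, short-circuiting to -1 on a missing character.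
import Mathlib
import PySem

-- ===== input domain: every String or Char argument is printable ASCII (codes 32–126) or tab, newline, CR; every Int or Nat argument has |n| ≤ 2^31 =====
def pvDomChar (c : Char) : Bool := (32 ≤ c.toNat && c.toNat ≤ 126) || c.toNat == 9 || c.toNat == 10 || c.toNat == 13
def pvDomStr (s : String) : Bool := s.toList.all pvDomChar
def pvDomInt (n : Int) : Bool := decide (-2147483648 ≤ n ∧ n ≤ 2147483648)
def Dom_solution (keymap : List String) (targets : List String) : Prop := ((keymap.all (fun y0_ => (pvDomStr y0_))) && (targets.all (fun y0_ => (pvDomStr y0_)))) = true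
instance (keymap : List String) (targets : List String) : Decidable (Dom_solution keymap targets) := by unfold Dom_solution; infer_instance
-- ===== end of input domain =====

-- B replaces A's char→positions dictionary (built from the keymap, each entry sorted by column)
-- with a direct per-target-character scan of the whole keymap for the minimum column; same return
-- value, a different (not faster) algorithm.

-- ===== PORT A =====
-- key_dict[c] gets (i,j) appended (fresh keys start a new singleton list)
def insertPosA (d : PySem.Dict Char (List (Int × Int))) (c : Char) (x : Int × Int) :
    PySem.Dict Char (List (Int × Int)) :=
  if d.contains c = false then d.insert c [x] else d.modify c [] (fun l => l ++ [x])

-- the double loop 'for i in range(len(keymap)): for j in range(len(keymap[i])): …'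
def buildDictA (keymap : List String) : PySem.Dict Char (List (Int × Int)) :=
  (PySem.List.enumerate keymap).foldl
    (fun d p => (PySem.List.enumerate p.2.toList).foldl (fun d q => insertPosA d q.2 (p.1, q.1)) d)
    PySem.Dict.empty

-- 'for word in key_dict.keys(): key_dict[word].sort(key=lambda x: x[1])'
def sortDictA (d : PySem.Dict Char (List (Int × Int))) : PySem.Dict Char (List (Int × Int)) :=
  d.keys.foldl (fun d w => d.insert w (PySem.List.sorted (d.getD w []) (fun x => x.2))) d

-- the inner 'for j in range(len(targets[i]))' loop with its break
def totalA (d : PySem.Dict Char (List (Int × Int))) : List Char → Int → Int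
  | [], total => total
  | c :: cs, total =>
    if d.contains c = false then -1
    else totalA d cs (total + (((d.getD c []).headD (0, 0)).2 + 1))

def solution (keymap : List String) (targets : List String) : List Int :=
  let key_dict := sortDictA (buildDictA keymap)
  targets.foldl (fun answer w => answer ++ [totalA key_dict w.toList 0]) []

-- ===== PORT B =====
-- minimum column of c over the whole keymap (-1 if absent): the two inner 'for row'/'for j' loops
def bestColB (keymap : List String) (c : Char) : Int :=
  keymap.foldl
    (fun best row =>
      (PySem.List.enumerate row.toList).foldl
        (fun best q => if q.2 = c ∧ (best = -1 ∨ q.1 < best) then q.1 else best) best)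
    (-1)

-- the 'for ch in word' loop with its break
def totalB (keymap : List String) : List Char → Int → Int
  | [], total => total
  | c :: cs, total =>
    if bestColB keymap c = -1 then -1 else totalB keymap cs (total + (bestColB keymap c + 1))

def solution_alt (keymap : List String) (targets : List String) : List Int :=
  targets.foldl (fun answer w => answer ++ [totalB keymap w.toList 0]) []

-- ===== PRECONDITION & SPEC =====
def Spec_solution (keymap : List String) (targets : List String) (out : List Int) : Prop := out = solution_alt keymap targets
instance (keymap : List String) (targets : List String) (out : List Int) : Decidable (Spec_solution keymap targets out) := by unfold Spec_solution; infer_instance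

-- ===== CLAIM (what is proved, stated in full; the proofs are below) =====
def Claim_equal_solution : Prop := ∀ (keymap : List String) (targets : List String), Dom_solution keymap targets → Spec_solution keymap targets (solution keymap targets)

-- ===== LEMMAS AND PROOFS =====

-- the positions list A's dict holds for character c
def posRow (i : Int) (row : List Char) (c : Char) : List (Int × Int) :=
  ((PySem.List.enumerate row 0).filter (fun q => q.2 == c)).map (fun q => (i, q.1))

def posAll (keymap : List String) (c : Char) : List (Int × Int) :=
  (PySem.List.enumerate keymap 0).flatMap (fun p => posRow p.1 p.2.toList c)

def minStep (b j : Int) : Int := if b = -1 ∨ j < b then j else b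

theorem insertPosA_getD (d : PySem.Dict Char (List (Int × Int))) (c c' : Char) (x : Int × Int) :
    (insertPosA d c x).getD c' [] = if c' = c then d.getD c' [] ++ [x] else d.getD c' [] := by
  unfold insertPosA
  by_cases h : d.contains c = false
  · rw [if_pos h, PySem.Dict.getD_insert]
    split_ifs with hc
    · subst hc; rw [PySem.Dict.getD_of_not_contains _ _ h]; rfl
    · rfl
  · rw [if_neg h, PySem.Dict.getD_modify]
    split_ifs with hc
    · subst hc; rfl
    · rfl


theorem insertPosA_contains (d : PySem.Dict Char (List (Int × Int))) (c c' : Char) (x : Int × Int) :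
    (insertPosA d c x).contains c' = (c' == c || d.contains c') := by
  unfold insertPosA
  by_cases h : d.contains c = false
  · rw [if_pos h, PySem.Dict.contains_insert]
  · rw [if_neg h, PySem.Dict.contains_modify]


theorem insertPosA_nodup (d : PySem.Dict Char (List (Int × Int))) (c : Char) (x : Int × Int)
    (h : d.keys.Nodup) : (insertPosA d c x).keys.Nodup := by
  unfold insertPosA
  by_cases hc : d.contains c = false
  · rw [if_pos hc]; exact PySem.Dict.nodup_keys_insert _ _ _ h
  · rw [if_neg hc]
    have hk := PySem.Dict.keys_modify d c [] (fun l => l ++ [x])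
    have := PySem.Dict.nodup_keys_insert d c ((d.getD c []) ++ [x]) h
    simpa [hk] using this


theorem rowfold_getD (l : List (Int × Char)) (d : PySem.Dict Char (List (Int × Int))) (i : Int) (c : Char) :
    ((l.foldl (fun d q => insertPosA d q.2 (i, q.1)) d).getD c []) =
      d.getD c [] ++ (l.filter (fun q => q.2 == c)).map (fun q => (i, q.1)) := by
  induction l generalizing d with
  | nil => simp
  | cons q l ih =>
    simp only [List.foldl_cons, List.filter_cons]
    rw [ih]
    by_cases hq : q.2 = c
    · rw [insertPosA_getD]
      simp [hq]
    · rw [insertPosA_getD]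
      simp [hq, Ne.symm hq]


theorem rowfold_contains (l : List (Int × Char)) (d : PySem.Dict Char (List (Int × Int))) (i : Int) (c : Char) :
    ((l.foldl (fun d q => insertPosA d q.2 (i, q.1)) d).contains c) =
      (d.contains c || l.any (fun q => q.2 == c)) := by
  induction l generalizing d with
  | nil => simp
  | cons q l ih =>
    simp only [List.foldl_cons, List.any_cons]
    rw [ih, insertPosA_contains]
    by_cases hq : q.2 = c
    · simp [hq]
    · have h1 : (c == q.2) = false := by simp [Ne.symm hq]
      have h2 : (q.2 == c) = false := by simp [hq]
      rw [h1, h2]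
      simp


theorem rowfold_nodup (l : List (Int × Char)) (d : PySem.Dict Char (List (Int × Int))) (i : Int)
    (h : d.keys.Nodup) : (l.foldl (fun d q => insertPosA d q.2 (i, q.1)) d).keys.Nodup := by
  induction l generalizing d with
  | nil => exact h
  | cons q l ih => exact ih _ (insertPosA_nodup _ _ _ h)


theorem any_enumerate_snd (xs : List Char) (s : Int) (c : Char) :
    (PySem.List.enumerate xs s).any (fun q => q.2 == c) = xs.any (fun ch => ch == c) := by
  induction xs generalizing s with
  | nil => simp [PySem.List.enumerate]
  | cons x xs ih => rw [PySem.List.enumerate_cons]; simp [ih]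


theorem build_getD (rows : List String) (s : Int) (d : PySem.Dict Char (List (Int × Int))) (c : Char) :
    (((PySem.List.enumerate rows s).foldl
        (fun d p => (PySem.List.enumerate p.2.toList).foldl (fun d q => insertPosA d q.2 (p.1, q.1)) d) d).getD c []) =
      d.getD c [] ++ (PySem.List.enumerate rows s).flatMap (fun p => posRow p.1 p.2.toList c) := by
  induction rows generalizing s d with
  | nil => simp [PySem.List.enumerate]
  | cons row rows ih =>
    rw [PySem.List.enumerate_cons]
    simp only [List.foldl_cons, List.flatMap_cons]
    rw [ih, rowfold_getD]
    unfold posRow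
    rw [List.append_assoc]


theorem build_contains (rows : List String) (s : Int) (d : PySem.Dict Char (List (Int × Int))) (c : Char) :
    (((PySem.List.enumerate rows s).foldl
        (fun d p => (PySem.List.enumerate p.2.toList).foldl (fun d q => insertPosA d q.2 (p.1, q.1)) d) d).contains c) =
      (d.contains c || rows.any (fun row => row.toList.any (fun ch => ch == c))) := by
  induction rows generalizing s d with
  | nil => simp [PySem.List.enumerate]
  | cons row rows ih =>
    rw [PySem.List.enumerate_cons]
    simp only [List.foldl_cons, List.any_cons]
    rw [ih, rowfold_contains, any_enumerate_snd, Bool.or_assoc]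


theorem build_nodup (rows : List String) (s : Int) (d : PySem.Dict Char (List (Int × Int)))
    (h : d.keys.Nodup) :
    ((PySem.List.enumerate rows s).foldl
        (fun d p => (PySem.List.enumerate p.2.toList).foldl (fun d q => insertPosA d q.2 (p.1, q.1)) d) d).keys.Nodup := by
  induction rows generalizing s d with
  | nil => simpa [PySem.List.enumerate] using h
  | cons row rows ih =>
    rw [PySem.List.enumerate_cons]
    simp only [List.foldl_cons]
    exact ih _ _ (rowfold_nodup _ _ _ h)


theorem buildDictA_getD (keymap : List String) (c : Char) :
    (buildDictA keymap).getD c [] = posAll keymap c := by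
  unfold buildDictA posAll
  rw [build_getD]
  simp [PySem.Dict.getD_empty]


theorem buildDictA_contains (keymap : List String) (c : Char) :
    (buildDictA keymap).contains c = keymap.any (fun row => row.toList.any (fun ch => ch == c)) := by
  unfold buildDictA
  rw [build_contains]
  simp [PySem.Dict.contains_empty]


theorem posAll_eq_nil_iff (keymap : List String) (c : Char) :
    posAll keymap c = [] ↔ keymap.any (fun row => row.toList.any (fun ch => ch == c)) = false := by
  unfold posAll posRow
  rw [List.flatMap_eq_nil_iff, List.any_eq_false]
  constructor
  · intro h row hrow
    simp only [Bool.not_eq_true, List.any_eq_false]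
    intro ch hch
    rcases List.mem_iff_getElem.mp hrow with ⟨k, hk, rfl⟩
    rcases List.mem_iff_getElem.mp hch with ⟨j, hj, rfl⟩
    have hmem : ((0 : Int) + k, keymap[k]) ∈ PySem.List.enumerate keymap 0 :=
      (PySem.List.mem_enumerate_iff _ _ _).mpr ⟨k, hk, rfl⟩
    have := h _ hmem
    rw [List.map_eq_nil_iff, List.filter_eq_nil_iff] at this
    have hq : ((0 : Int) + j, keymap[k].toList[j]) ∈ PySem.List.enumerate keymap[k].toList 0 :=
      (PySem.List.mem_enumerate_iff _ _ _).mpr ⟨j, hj, rfl⟩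
    have := this _ hq
    simpa using this
  · intro h p hp
    rw [List.map_eq_nil_iff, List.filter_eq_nil_iff]
    intro q hq
    rcases (PySem.List.mem_enumerate_iff _ _ _).mp hp with ⟨k, hk, rfl⟩
    rcases (PySem.List.mem_enumerate_iff _ _ _).mp hq with ⟨j, hj, rfl⟩
    have hrow := h _ (List.getElem_mem hk)
    simp only [Bool.not_eq_true, List.any_eq_false] at hrow
    have := hrow _ (List.getElem_mem hj)
    simpa using this


theorem posAll_snd_nonneg (keymap : List String) (c : Char) :
    ∀ x ∈ posAll keymap c, 0 ≤ x.2 := by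
  intro x hx
  unfold posAll posRow at hx
  rw [List.mem_flatMap] at hx
  rcases hx with ⟨p, _, hx⟩
  rw [List.mem_map] at hx
  rcases hx with ⟨q, hq, rfl⟩
  rcases (PySem.List.mem_enumerate_iff _ _ _).mp (List.mem_of_mem_filter hq) with ⟨j, hj, rfl⟩
  simp


theorem sortfold_getD (ks : List Char) (hk : ks.Nodup) (d : PySem.Dict Char (List (Int × Int))) (c : Char) :
    ((ks.foldl (fun d w => d.insert w (PySem.List.sorted (d.getD w []) (fun x => x.2))) d).getD c []) =
      if c ∈ ks then PySem.List.sorted (d.getD c []) (fun x => x.2) else d.getD c [] := by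
  induction ks generalizing d with
  | nil => simp
  | cons k ks ih =>
    rcases List.nodup_cons.mp hk with ⟨hknot, hks⟩
    simp only [List.foldl_cons]
    rw [ih hks]
    by_cases hc : c = k
    · subst hc
      rw [if_neg hknot, if_pos (List.mem_cons_self ..), PySem.Dict.getD_insert, if_pos rfl]
    · rw [PySem.Dict.getD_insert, if_neg hc]
      by_cases hm : c ∈ ks
      · rw [if_pos hm, if_pos (List.mem_cons_of_mem _ hm)]
      · rw [if_neg hm, if_neg (by simp [hc, hm])]


theorem sortfold_contains (ks : List Char) (d : PySem.Dict Char (List (Int × Int))) (c : Char) :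
    ((ks.foldl (fun d w => d.insert w (PySem.List.sorted (d.getD w []) (fun x => x.2))) d).contains c) =
      (decide (c ∈ ks) || d.contains c) := by
  induction ks generalizing d with
  | nil => simp
  | cons k ks ih =>
    simp only [List.foldl_cons]
    rw [ih, PySem.Dict.contains_insert]
    by_cases hc : c = k
    · simp [hc]
    · simp [hc, Bool.or_left_comm]


theorem rowmin_eq (l : List (Int × Char)) (c : Char) (b : Int) :
    l.foldl (fun best q => if q.2 = c ∧ (best = -1 ∨ q.1 < best) then q.1 else best) b
      = ((l.filter (fun q => q.2 == c)).map (fun q => q.1)).foldl minStep b := by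
  rw [List.foldl_map, List.foldl_filter]
  have hfun : (fun (best : Int) (q : Int × Char) => if q.2 = c ∧ (best = -1 ∨ q.1 < best) then q.1 else best)
      = (fun (x : Int) (y : Int × Char) => if (y.2 == c) = true then minStep x y.1 else x) := by
    funext best q
    by_cases h : q.2 = c <;> simp [h, minStep]
  rw [hfun]

theorem bestfold_eq (keymap : List String) (c : Char) (s : Int) (b : Int) :
    keymap.foldl
        (fun best row =>
          (PySem.List.enumerate row.toList).foldl
            (fun best q => if q.2 = c ∧ (best = -1 ∨ q.1 < best) then q.1 else best) best) b
      = ((PySem.List.enumerate keymap s).flatMap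
          (fun p => ((PySem.List.enumerate p.2.toList).filter (fun q => q.2 == c)).map (fun q => q.1))).foldl
          minStep b := by
  induction keymap generalizing s b with
  | nil => simp [PySem.List.enumerate]
  | cons row rows ih =>
    rw [PySem.List.enumerate_cons]
    simp only [List.foldl_cons, List.flatMap_cons, List.foldl_append]
    rw [rowmin_eq]
    exact ih (s + 1) _

theorem bestColB_eq_minfold (keymap : List String) (c : Char) :
    bestColB keymap c = ((posAll keymap c).map (fun x => x.2)).foldl minStep (-1) := by
  unfold bestColB posAll posRow
  rw [bestfold_eq keymap c 0, List.map_flatMap]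
  simp [List.map_map, Function.comp_def]


theorem minfold_spec (cols : List Int) (b : Int) (hb : 0 ≤ b) (h : ∀ j ∈ cols, 0 ≤ j) :
    cols.foldl minStep b ∈ b :: cols ∧ cols.foldl minStep b ≤ b ∧ ∀ j ∈ cols, cols.foldl minStep b ≤ j := by
  induction cols generalizing b with
  | nil => exact ⟨List.mem_cons_self .., le_refl _, by simp⟩
  | cons j cols ih =>
    have hj : 0 ≤ j := h j (List.mem_cons_self ..)
    have hstep : minStep b j = if j < b then j else b := by
      unfold minStep
      split_ifs with h1 h2 h2 <;> first | rfl | omega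
    have hb' : 0 ≤ minStep b j := by rw [hstep]; split_ifs <;> omega
    have hmem : minStep b j ∈ [b, j] := by rw [hstep]; split_ifs <;> simp
    have hle_b : minStep b j ≤ b := by rw [hstep]; split_ifs <;> omega
    have hle_j : minStep b j ≤ j := by rw [hstep]; split_ifs <;> omega
    obtain ⟨m1, m2, m3⟩ := ih (minStep b j) hb' (fun x hx => h x (List.mem_cons_of_mem _ hx))
    simp only [List.foldl_cons]
    refine ⟨?_, le_trans m2 hle_b, ?_⟩
    · rcases List.mem_cons.mp m1 with hcase | hcase
      · rw [hcase]
        rcases List.mem_cons.mp hmem with h' | h'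
        · rw [h']; exact List.mem_cons_self ..
        · rw [List.mem_singleton.mp h']
          exact List.mem_cons_of_mem _ (List.mem_cons_self ..)
      · exact List.mem_cons_of_mem _ (List.mem_cons_of_mem _ hcase)
    · intro x hx
      rcases List.mem_cons.mp hx with rfl | hx
      · exact le_trans m2 hle_j
      · exact m3 x hx


theorem minfold_nonempty (cols : List Int) (hne : cols ≠ []) (h : ∀ j ∈ cols, 0 ≤ j) :
    cols.foldl minStep (-1) ∈ cols ∧ ∀ j ∈ cols, cols.foldl minStep (-1) ≤ j := by
  rcases cols with _ | ⟨j, cols⟩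
  · exact absurd rfl hne
  · have hj : 0 ≤ j := h j (List.mem_cons_self ..)
    have hstep : minStep (-1) j = j := by unfold minStep; simp
    simp only [List.foldl_cons, hstep]
    obtain ⟨m1, m2, m3⟩ := minfold_spec cols j hj (fun x hx => h x (List.mem_cons_of_mem _ hx))
    exact ⟨m1, fun x hx => by rcases List.mem_cons.mp hx with rfl | hx; exact m2; exact m3 x hx⟩


theorem sortDictA_buildDictA_contains (keymap : List String) (c : Char) :
    (sortDictA (buildDictA keymap)).contains c = (buildDictA keymap).contains c := by
  unfold sortDictA
  rw [sortfold_contains]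
  by_cases h : (buildDictA keymap).contains c
  · simp [h]
  · have hm : c ∉ (buildDictA keymap).keys := fun hmem =>
      h ((PySem.Dict.contains_iff_mem_keys _ _).mpr hmem)
    simp [h, hm]


theorem contains_iff_bestCol (keymap : List String) (c : Char) :
    (sortDictA (buildDictA keymap)).contains c = false ↔ bestColB keymap c = -1 := by
  rw [sortDictA_buildDictA_contains, buildDictA_contains, bestColB_eq_minfold]
  by_cases hnil : posAll keymap c = []
  · have hany := (posAll_eq_nil_iff keymap c).mp hnil
    rw [hany, hnil]
    simp
  · have hany : keymap.any (fun row => row.toList.any (fun ch => ch == c)) = true := by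
      cases hb : keymap.any (fun row => row.toList.any (fun ch => ch == c)) with
      | false => exact absurd ((posAll_eq_nil_iff keymap c).mpr hb) hnil
      | true => rfl
    rw [hany]
    have hcols : (posAll keymap c).map (fun x => x.2) ≠ [] := by
      simpa using hnil
    have hnonneg : ∀ j ∈ (posAll keymap c).map (fun x => x.2), 0 ≤ j := by
      intro j hj
      rcases List.mem_map.mp hj with ⟨x, hx, rfl⟩
      exact posAll_snd_nonneg keymap c x hx
    obtain ⟨m1, _⟩ := minfold_nonempty _ hcols hnonneg
    have : 0 ≤ ((posAll keymap c).map (fun x => x.2)).foldl minStep (-1) := hnonneg _ m1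
    constructor
    · intro h; exact absurd h (by simp)
    · intro h; omega


theorem head_sorted_eq_bestCol (keymap : List String) (c : Char)
    (h : (sortDictA (buildDictA keymap)).contains c = true) :
    (((sortDictA (buildDictA keymap)).getD c []).headD (0, 0)).2 = bestColB keymap c := by
  have hd1 : (buildDictA keymap).contains c = true := by
    rw [← sortDictA_buildDictA_contains]; exact h
  have hnil : posAll keymap c ≠ [] := by
    intro hnil
    have hany := (posAll_eq_nil_iff keymap c).mp hnil
    rw [buildDictA_contains, hany] at hd1
    exact absurd hd1 (by simp)
  have hnodup : (buildDictA keymap).keys.Nodup := by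
    unfold buildDictA
    exact build_nodup _ _ _ (by simp [PySem.Dict.keys_empty])
  have hmem : c ∈ (buildDictA keymap).keys := (PySem.Dict.contains_iff_mem_keys _ _).mp hd1
  have hget : (sortDictA (buildDictA keymap)).getD c [] =
      PySem.List.sorted (posAll keymap c) (fun x => x.2) := by
    unfold sortDictA
    rw [sortfold_getD _ hnodup, if_pos hmem, buildDictA_getD]
  have hsne : PySem.List.sorted (posAll keymap c) (fun x => x.2) ≠ [] := by
    intro hx
    exact hnil ((PySem.List.sorted_eq_nil_iff ..).mp hx)
  rcases hs : PySem.List.sorted (posAll keymap c) (fun x => x.2) with _ | ⟨m, t⟩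
  · exact absurd hs hsne
  have hmle : ∀ y ∈ posAll keymap c, m.2 ≤ y.2 := PySem.List.key_head_sorted_le _ _ hs
  have hmmem : m ∈ posAll keymap c := by
    have hperm := PySem.List.sorted_perm (posAll keymap c) (fun x => x.2) false
    rw [hs] at hperm
    exact hperm.mem_iff.mp (List.mem_cons_self ..)
  have hcols : (posAll keymap c).map (fun x => x.2) ≠ [] := by simpa using hnil
  have hnonneg : ∀ j ∈ (posAll keymap c).map (fun x => x.2), 0 ≤ j := by
    intro j hj
    rcases List.mem_map.mp hj with ⟨x, hx, rfl⟩
    exact posAll_snd_nonneg keymap c x hx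
  obtain ⟨m1, m2⟩ := minfold_nonempty _ hcols hnonneg
  rw [hget, hs, bestColB_eq_minfold]
  simp only [List.headD_cons]
  rcases List.mem_map.mp m1 with ⟨y, hy, hyeq⟩
  have h1 : ((posAll keymap c).map (fun x => x.2)).foldl minStep (-1) ≤ m.2 :=
    m2 _ (List.mem_map.mpr ⟨m, hmmem, rfl⟩)
  have h2 : m.2 ≤ ((posAll keymap c).map (fun x => x.2)).foldl minStep (-1) := by
    rw [← hyeq]; exact hmle y hy
  omega


theorem totalA_eq_totalB (keymap : List String) (cs : List Char) (total : Int) :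
    totalA (sortDictA (buildDictA keymap)) cs total = totalB keymap cs total := by
  induction cs generalizing total with
  | nil => rfl
  | cons c cs ih =>
    by_cases h : (sortDictA (buildDictA keymap)).contains c = false
    · have hb : bestColB keymap c = -1 := (contains_iff_bestCol _ _).mp h
      simp [totalA, totalB, h, hb]
    · have h' : (sortDictA (buildDictA keymap)).contains c = true := by
        simpa using h
      have hb : bestColB keymap c ≠ -1 := by
        intro hb
        exact h ((contains_iff_bestCol _ _).mpr hb)
      simp only [totalA, totalB]
      rw [if_neg (by simp [h']), if_neg hb, head_sorted_eq_bestCol keymap c h', ih]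


-- ===== VERDICT (by name: the statement is the Claim_ definition above) =====
theorem solution_spec : Claim_equal_solution := by
  intro keymap targets _
  show _ = _
  simp only [solution, solution_alt, totalA_eq_totalB]
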